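-- pv_equiv track=rewrite | github.com/wjdguswn1203/PaperTechTrend | python/Ptt_streamlit.py | merge_short_paragraphs
-- ===== SOURCE A (Python) =====
-- def merge_short_paragraphs(paragraphs, min_length):
--     merged_paragraphs = []
--     current_paragraph = ""
--
--     for paragraph in paragraphs:
--         if len(paragraph.strip()) < min_length:
--             current_paragraph += " " + paragraph.strip()
--         else:
--             if current_paragraph:
--                 merged_paragraphs.append(current_paragraph.strip())
--                 current_paragraph = ""
--             merged_paragraphs.append(paragraph.strip())
--
--     if current_paragraph:
--         merged_paragraphs.append(current_paragraph.strip())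
--
--     return merged_paragraphs
-- ===== SOURCE B (Python) =====
-- def merge_short_paragraphs(paragraphs, min_length):
--     stripped = [p.strip() for p in paragraphs]
--     out = []
--     i = 0
--     n = len(stripped)
--     while i < n:
--         if len(stripped[i]) < min_length:
--             j = i
--             while j < n and len(stripped[j]) < min_length:
--                 j += 1
--             out.append(' '.join(stripped[i:j]).strip())
--             i = j
--         else:
--             out.append(stripped[i])
--             i += 1
--     return out
-- ===== Notes on version B (the rewrite author's own statement) =====
-- stated objective: alternative
-- what changed: Replaced A's flush-buffer state machine (merged list + growing current_paragraph string) with a strip-once pass that groups maximal runs of short paragraphs by index scanning and joins each run in one step.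
import Mathlib
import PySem

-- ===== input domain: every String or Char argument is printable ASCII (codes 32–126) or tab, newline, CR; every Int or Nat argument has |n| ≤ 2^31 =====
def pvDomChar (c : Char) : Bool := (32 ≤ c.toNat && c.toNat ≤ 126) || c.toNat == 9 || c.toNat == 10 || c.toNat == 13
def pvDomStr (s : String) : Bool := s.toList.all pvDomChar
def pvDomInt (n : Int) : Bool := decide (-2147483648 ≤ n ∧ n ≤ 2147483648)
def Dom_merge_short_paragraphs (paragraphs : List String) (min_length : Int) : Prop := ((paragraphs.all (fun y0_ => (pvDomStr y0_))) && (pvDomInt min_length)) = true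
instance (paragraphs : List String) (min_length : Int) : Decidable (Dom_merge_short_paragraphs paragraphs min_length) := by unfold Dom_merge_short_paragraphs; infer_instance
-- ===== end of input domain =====

-- B replaces A's flush-buffer state machine with a strip-once pass that joins each
-- maximal run of short paragraphs in one step (objective: alternative decomposition, same cost).

-- ===== PORT A =====
def merge_short_paragraphs (paragraphs : List String) (min_length : Int) : List String :=
  -- state = (merged_paragraphs, current_paragraph)
  let st := paragraphs.foldl (fun (st : List String × String) paragraph =>
    if PySem.Str.len (PySem.Str.strip paragraph) < min_length then
      (st.1, st.2 ++ " " ++ PySem.Str.strip paragraph)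
    else
      ((if st.2 ≠ "" then st.1 ++ [PySem.Str.strip st.2] else st.1)
        ++ [PySem.Str.strip paragraph], ""))
    ([], "")
  if st.2 ≠ "" then st.1 ++ [PySem.Str.strip st.2] else st.1

-- ===== PORT B =====
-- Source B's short test 'len(stripped[j]) < min_length' on the once-stripped list
def altShort (min_length : Int) (s : String) : Bool := decide (PySem.Str.len s < min_length)

-- Source B's index loop: the inner while that advances j over a run of shorts is the
-- takeWhile/dropWhile split of the remaining stripped list
def altGo (min_length : Int) : List String → List String
  | [] => []
  | s :: rest =>
    if PySem.Str.len s < min_length then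
      PySem.Str.strip (PySem.Str.join " " (s :: rest.takeWhile (altShort min_length)))
        :: altGo min_length (rest.dropWhile (altShort min_length))
    else
      s :: altGo min_length rest
termination_by l => l.length
decreasing_by
  · exact Nat.lt_succ_of_le (List.length_dropWhile_le _ _)
  · exact Nat.lt_succ_self _

def merge_short_paragraphs_alt (paragraphs : List String) (min_length : Int) : List String :=
  altGo min_length (paragraphs.map PySem.Str.strip)

-- ===== PRECONDITION & SPEC =====
def Spec_merge_short_paragraphs (paragraphs : List String) (min_length : Int) (out : List String) : Prop := out = merge_short_paragraphs_alt paragraphs min_length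
instance (paragraphs : List String) (min_length : Int) (out : List String) : Decidable (Spec_merge_short_paragraphs paragraphs min_length out) := by unfold Spec_merge_short_paragraphs; infer_instance

-- ===== CLAIM (what is proved, stated in full; the proofs are below) =====
def Claim_equal_merge_short_paragraphs : Prop := ∀ (paragraphs : List String) (min_length : Int), Dom_merge_short_paragraphs paragraphs min_length → Spec_merge_short_paragraphs paragraphs min_length (merge_short_paragraphs paragraphs min_length)

-- ===== LEMMAS AND PROOFS =====

-- A's loop body, named (identical to the lambda in the port)
def aStep (min_length : Int) (st : List String × String) (paragraph : String) : List String × String :=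
  if PySem.Str.len (PySem.Str.strip paragraph) < min_length then
    (st.1, st.2 ++ " " ++ PySem.Str.strip paragraph)
  else
    ((if st.2 ≠ "" then st.1 ++ [PySem.Str.strip st.2] else st.1)
      ++ [PySem.Str.strip paragraph], "")

-- A's trailing flush
def aFlush (cur : String) : List String := if cur ≠ "" then [PySem.Str.strip cur] else []

-- A's loop as structural recursion on the remaining paragraphs, buffer as parameter
def aRec (min_length : Int) (cur : String) : List String → List String
  | [] => aFlush cur
  | p :: rest =>
    if PySem.Str.len (PySem.Str.strip p) < min_length then
      aRec min_length (cur ++ " " ++ PySem.Str.strip p) rest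
    else
      aFlush cur ++ (PySem.Str.strip p :: aRec min_length "" rest)

lemma aFold_eq_aRec (min_length : Int) (xs : List String) :
    ∀ (acc : List String) (cur : String),
      (let st := xs.foldl (aStep min_length) (acc, cur)
       if st.2 ≠ "" then st.1 ++ [PySem.Str.strip st.2] else st.1)
      = acc ++ aRec min_length cur xs := by
  induction xs with
  | nil => intro acc cur; simp [aRec, aFlush]; split <;> simp
  | cons p rest ih =>
    intro acc cur
    simp only [List.foldl_cons, aStep, aRec]
    split
    · exact ih acc _
    · split <;> simp [aFlush, *]

lemma append_space_ne_empty (c s : String) : c ++ " " ++ s ≠ "" := by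
  intro h
  have := congrArg String.toList h
  simp [String.toList_append] at this

-- joining one more piece onto a space-joined run
lemma join_shift (x y : List Char) (L : List (List Char)) :
    PySem.Chars.join [' '] ((x ++ [' '] ++ y) :: L) = x ++ [' '] ++ PySem.Chars.join [' '] (y :: L) := by
  cases L with
  | nil => simp [PySem.Chars.join_singleton]
  | cons b L' =>
    rw [PySem.Chars.join_cons_cons, PySem.Chars.join_cons_cons]
    simp [List.append_assoc]

-- A's buffer accumulation over a run is " " + the space-join of the stripped pieces
lemma foldl_buffer_eq_join (ts : List String) :
    ∀ (c s : String),
      ts.foldl (fun c t => c ++ " " ++ PySem.Str.strip t) (c ++ " " ++ s)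
        = c ++ " " ++ PySem.Str.join " " (s :: ts.map PySem.Str.strip) := by
  induction ts with
  | nil =>
    intro c s
    apply String.toList_inj.mp
    simp [PySem.Str.join, PySem.Chars.join_singleton]
  | cons t ts ih =>
    intro c s
    have hassoc : c ++ " " ++ s ++ " " ++ PySem.Str.strip t
        = c ++ " " ++ (s ++ " " ++ PySem.Str.strip t) := by
      simp [String.append_assoc]
    simp only [List.foldl_cons, hassoc, ih]
    apply String.toList_inj.mp
    simp only [String.toList_append, PySem.Str.join, String.toList_ofList, List.map_cons]
    rw [show (" ":String).toList = [' '] from rfl]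
    rw [join_shift, PySem.Chars.join_cons_cons]

-- consuming a run of shorts only grows the buffer
lemma aRec_shortrun (min_length : Int) (ts : List String) :
    ∀ (cur : String) (xs : List String),
      (∀ t ∈ ts, PySem.Str.len (PySem.Str.strip t) < min_length) →
      aRec min_length cur (ts ++ xs)
        = aRec min_length (ts.foldl (fun c t => c ++ " " ++ PySem.Str.strip t) cur) xs := by
  induction ts with
  | nil => intro cur xs _; rfl
  | cons t ts ih =>
    intro cur xs h
    simp only [List.cons_append, aRec, if_pos (h t (by simp))]
    exact ih _ xs (fun t ht => h t (by simp [ht]))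

lemma strip_pad (s : String) : PySem.Str.strip ("" ++ " " ++ s) = PySem.Str.strip s := by
  apply String.toList_inj.mp
  simp only [PySem.Str.strip, String.toList_ofList, String.toList_append]
  rw [show ("":String).toList = [] from rfl, show (" ":String).toList = [' '] from rfl]
  simp [PySem.Chars.strip, PySem.Chars.lstrip, PySem.Chars.isspace]

lemma main_eq (min_length : Int) :
    ∀ (n : Nat) (xs : List String), xs.length ≤ n →
      aRec min_length "" xs = altGo min_length (xs.map PySem.Str.strip) := by
  intro n
  induction n with
  | zero =>
    intro xs hlen
    have : xs = [] := List.eq_nil_of_length_eq_zero (Nat.le_zero.mp hlen)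
    subst this; simp [aRec, aFlush, altGo]
  | succ n ih =>
    intro xs hlen
    cases xs with
    | nil => simp [aRec, aFlush, altGo]
    | cons p rest =>
      by_cases hshort : PySem.Str.len (PySem.Str.strip p) < min_length
      · -- short head: A accumulates the whole run, B joins it in one step
        set P : String → Bool := altShort min_length ∘ PySem.Str.strip with hP
        set ts := rest.takeWhile P with hts
        set rs := rest.dropWhile P with hrs
        have hsplit : rest = ts ++ rs := (List.takeWhile_append_dropWhile).symm
        have htshort : ∀ t ∈ ts, PySem.Str.len (PySem.Str.strip t) < min_length := by
          intro t ht
          have := List.mem_takeWhile_imp ht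
          simpa [hP, altShort] using this
        have hbuf := foldl_buffer_eq_join ts "" (PySem.Str.strip p)
        have hA : aRec min_length "" (p :: rest)
            = aRec min_length ("" ++ " " ++ PySem.Str.join " " (PySem.Str.strip p :: ts.map PySem.Str.strip)) rs := by
          have h1 : aRec min_length "" (p :: rest)
              = aRec min_length ("" ++ " " ++ PySem.Str.strip p) rest := by
            simp only [aRec]; rw [if_pos hshort]
          rw [h1, hsplit, aRec_shortrun min_length ts _ rs htshort, hbuf]
        have hBmaps : (rest.map PySem.Str.strip).takeWhile (altShort min_length) = ts.map PySem.Str.strip ∧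
            (rest.map PySem.Str.strip).dropWhile (altShort min_length) = rs.map PySem.Str.strip := by
          constructor
          · rw [List.takeWhile_map]
          · rw [List.dropWhile_map]
        have hB : altGo min_length ((p :: rest).map PySem.Str.strip)
            = PySem.Str.strip (PySem.Str.join " " (PySem.Str.strip p :: ts.map PySem.Str.strip))
              :: altGo min_length (rs.map PySem.Str.strip) := by
          simp only [List.map_cons, altGo, if_pos hshort, hBmaps.1, hBmaps.2]
        rw [hA, hB]
        have hne := append_space_ne_empty "" (PySem.Str.join " " (PySem.Str.strip p :: ts.map PySem.Str.strip))
        cases hrscase : rs with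
        | nil =>
          simp only [aRec, aFlush, if_pos hne, List.map_nil]
          rw [strip_pad, show altGo min_length [] = [] by simp [altGo]]
        | cons r rs' =>
          have hrlong : ¬ PySem.Str.len (PySem.Str.strip r) < min_length := by
            have hhead := List.head_dropWhile_not P (l := rest) (by simp [← hrs, hrscase])
            simp only [← hrs, hrscase, List.head_cons] at hhead
            simpa [hP, altShort] using hhead
          have hrec : rs'.length ≤ n := by
            have h1 : rs.length ≤ rest.length := hrs ▸ List.length_dropWhile_le _ _
            have h2 : rest.length ≤ n := by simpa using hlen
            have h3 : rs.length = rs'.length + 1 := by rw [hrscase]; simp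
            omega
          simp only [aRec, aFlush, if_pos hne, List.map_cons, altGo, if_neg hrlong]
          rw [strip_pad, ih rs' hrec]
          simp
      · -- long head
        have hrec : rest.length ≤ n := by simpa using hlen
        simp only [aRec, aFlush, List.map_cons, altGo, if_neg hshort]
        rw [ih rest hrec]
        simp

-- ===== VERDICT (by name: the statement is the Claim_ definition above) =====
theorem merge_short_paragraphs_spec : Claim_equal_merge_short_paragraphs := by
  intro paragraphs min_length _
  show merge_short_paragraphs paragraphs min_length = merge_short_paragraphs_alt paragraphs min_length
  have h := aFold_eq_aRec min_length paragraphs [] ""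
  simp only [List.nil_append] at h
  rw [show merge_short_paragraphs paragraphs min_length
        = (let st := paragraphs.foldl (aStep min_length) ([], "")
           if st.2 ≠ "" then st.1 ++ [PySem.Str.strip st.2] else st.1) from rfl, h]
  exact main_eq min_length paragraphs.length paragraphs (le_refl _)
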